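-- pv_equiv track=rewrite | github.com/Harmeet-Dhillon/Structure-From-Motion | Wrapper.py | getCommonWorldPoints
-- ===== SOURCE A (Python) =====
-- def getCommonWorldPoints(inlier_matches_12, inlier_matches_1c, world_points_12):
--     '''
--     # inlier_matches_12: inlier matches between image 1 and 2 (tuple of tuples)
--     # inlier_matches_1c: inlier matches between image 1 and current image 'c' (tuple of tuples)
--     # world_points_12: world points for inlier matches between image 1 and 2
--     '''
--
--     pt_idx_matches_short = []
--     pt_idx_matches_long = []
--
--     # identify shorter/longer matches
--     if len(inlier_matches_1c) < len(inlier_matches_12):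
--         shorter_matches = inlier_matches_1c
--         longer_matches = inlier_matches_12
--     else:
--         shorter_matches = inlier_matches_12
--         longer_matches = inlier_matches_1c
--
--     # iterate over matches with shorter length
--
--     for short_idx, match in enumerate(shorter_matches):
--         img_1_pt = match[0]
--
--         # Find the index in longer_matches where the first value matches img_1_pt
--         for long_idx, long_match in enumerate(longer_matches):
--             if long_match[0] == img_1_pt:
--                 pt_idx_matches_short.append(short_idx)
--                 pt_idx_matches_long.append(long_idx)
--                 break  # Stop once the first match is found
--
--     if len(inlier_matches_1c) < len(inlier_matches_12):
--         img_1_pt_indices_1c = pt_idx_matches_short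
--         img_1_pt_indices_12 = pt_idx_matches_long
--     else:
--         img_1_pt_indices_12 = pt_idx_matches_short
--         img_1_pt_indices_1c = pt_idx_matches_long
--
--     # Filter world points and inlier matches 1c
--     common_world_points = [world_points_12[i] for i in img_1_pt_indices_12]
--     filtered_inlier_matches_1c = [inlier_matches_1c[i] for i in img_1_pt_indices_1c]
--
--     return common_world_points, filtered_inlier_matches_1c
-- ===== SOURCE B (Python) =====
-- def getCommonWorldPoints(inlier_matches_12, inlier_matches_1c, world_points_12):
--     # Sort-merge join on the image-1 point value (instead of A's nested scans):
--     # sort both keyed lists by value, collapse equal-value runs of the longer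
--     # list to the minimal original index (= A's first match), merge the two
--     # sorted lists, then restore the shorter list's order by sorting the
--     # matched pairs on the short index.
--     if len(inlier_matches_1c) < len(inlier_matches_12):
--         shorter, longer = inlier_matches_1c, inlier_matches_12
--     else:
--         shorter, longer = inlier_matches_12, inlier_matches_1c
--
--     L = sorted(((m[0], j) for j, m in enumerate(longer)), key=lambda t: t[0])
--     # collapse each run of equal values to its minimal index
--     Lu = []
--     k = 0
--     while k < len(L):
--         if k + 1 < len(L) and L[k][0] == L[k + 1][0]:
--             L[k + 1] = (L[k][0], min(L[k][1], L[k + 1][1]))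
--         else:
--             Lu.append(L[k])
--         k += 1
--
--     S = sorted(((m[0], i) for i, m in enumerate(shorter)), key=lambda t: t[0])
--
--     # merge join of the two value-sorted lists -> (short_idx, long_idx) pairs
--     pairs = []
--     a = b = 0
--     while a < len(S) and b < len(Lu):
--         if S[a][0] < Lu[b][0]:
--             a += 1
--         elif Lu[b][0] < S[a][0]:
--             b += 1
--         else:
--             pairs.append((S[a][1], Lu[b][1]))
--             a += 1
--     pairs = sorted(pairs, key=lambda t: t[0])
--
--     if len(inlier_matches_1c) < len(inlier_matches_12):
--         return [world_points_12[j] for _, j in pairs], [inlier_matches_1c[i] for i, _ in pairs]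
--     else:
--         return [world_points_12[i] for i, _ in pairs], [inlier_matches_1c[j] for _, j in pairs]
-- ===== Notes on version B (the rewrite author's own statement) =====
-- stated objective: alternative
-- what changed: Replaced A's nested linear scans by a sort-merge join: both match lists are keyed by their image-1 point value and sorted, the longer list's equal-value runs are collapsed to the minimal index, the two sorted lists are merged in one pass, and the matched pairs are re-sorted by short index to restore A's output order.
import Mathlib
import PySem

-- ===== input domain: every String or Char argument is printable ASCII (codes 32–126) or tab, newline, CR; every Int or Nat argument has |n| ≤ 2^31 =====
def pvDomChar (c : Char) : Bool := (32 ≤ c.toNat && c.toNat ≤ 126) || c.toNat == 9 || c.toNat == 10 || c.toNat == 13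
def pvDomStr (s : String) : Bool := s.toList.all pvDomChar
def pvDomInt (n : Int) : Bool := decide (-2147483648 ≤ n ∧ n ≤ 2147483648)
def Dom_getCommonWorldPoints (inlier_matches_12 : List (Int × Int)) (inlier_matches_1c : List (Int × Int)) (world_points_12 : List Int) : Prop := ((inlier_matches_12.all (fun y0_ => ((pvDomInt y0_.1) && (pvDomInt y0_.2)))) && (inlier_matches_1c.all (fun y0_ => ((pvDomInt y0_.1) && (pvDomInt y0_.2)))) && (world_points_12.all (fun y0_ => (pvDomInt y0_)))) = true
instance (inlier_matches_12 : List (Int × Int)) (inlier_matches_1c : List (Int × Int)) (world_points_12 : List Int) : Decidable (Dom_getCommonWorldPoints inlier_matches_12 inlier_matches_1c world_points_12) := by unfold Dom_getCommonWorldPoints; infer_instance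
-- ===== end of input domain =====

-- B replaces A's nested linear scans by a sort–merge join: both match lists are keyed by
-- their image-1 point value and sorted, the longer list's equal-value runs are collapsed to
-- the minimal index, the two sorted lists are merged, and the matched pairs are re-sorted by
-- short index; return values are proved equal on all non-raising inputs.

-- ===== PORT A =====
-- inner loop of A: first index j (from start j0) in the list whose first component equals x
def pvAfind : List (Int × Int) → Int → Int → Option Int
  | [], _, _ => none
  | m :: rest, j, x => if m.1 = x then some j else pvAfind rest (j + 1) x

-- outer loop of A: builds (pt_idx_matches_short, pt_idx_matches_long) in order
def pvAscan : List (Int × Int) → Int → List (Int × Int) → List Int × List Int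
  | [], _, _ => ([], [])
  | m :: rest, i, longer =>
    match pvAfind longer 0 m.1 with
    | some j =>
      let r := pvAscan rest (i + 1) longer
      (i :: r.1, j :: r.2)
    | none => pvAscan rest (i + 1) longer

def getCommonWorldPoints (inlier_matches_12 : List (Int × Int)) (inlier_matches_1c : List (Int × Int)) (world_points_12 : List Int) : List Int × (List (Int × Int)) :=
  let shorter := if inlier_matches_1c.length < inlier_matches_12.length then inlier_matches_1c else inlier_matches_12
  let longer := if inlier_matches_1c.length < inlier_matches_12.length then inlier_matches_12 else inlier_matches_1c
  let p := pvAscan shorter 0 longer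
  let idx12 := if inlier_matches_1c.length < inlier_matches_12.length then p.2 else p.1
  let idx1c := if inlier_matches_1c.length < inlier_matches_12.length then p.1 else p.2
  (idx12.map (fun i => PySem.List.pyGetD world_points_12 i 0),
   idx1c.map (fun i => PySem.List.pyGetD inlier_matches_1c i (0, 0)))

-- ===== PORT B =====
-- Source B's run-collapsing loop over the value-sorted keyed list: each run of equal values
-- is collapsed to one entry carrying the minimal index (the suffix L[k:] is the argument)
def pvBdedupMin : List (Int × Int) → List (Int × Int)
  | [] => []
  | [p] => [p]
  | p :: q :: rest =>
    if p.1 = q.1 then pvBdedupMin ((p.1, min p.2 q.2) :: rest)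
    else p :: pvBdedupMin (q :: rest)
  termination_by l => l.length

-- Source B's merge-join while loop over the two value-sorted lists (suffixes S[a:], Lu[b:])
def pvBmerge : List (Int × Int) → List (Int × Int) → List (Int × Int)
  | [], _ => []
  | _ :: _, [] => []
  | p :: S, q :: L =>
    if p.1 < q.1 then pvBmerge S (q :: L)
    else if q.1 < p.1 then pvBmerge (p :: S) L
    else (p.2, q.2) :: pvBmerge S (q :: L)
  termination_by S L => S.length + L.length

def getCommonWorldPoints_alt (inlier_matches_12 : List (Int × Int)) (inlier_matches_1c : List (Int × Int)) (world_points_12 : List Int) : List Int × (List (Int × Int)) :=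
  let shorter := if inlier_matches_1c.length < inlier_matches_12.length then inlier_matches_1c else inlier_matches_12
  let longer := if inlier_matches_1c.length < inlier_matches_12.length then inlier_matches_12 else inlier_matches_1c
  let L := PySem.List.sorted ((PySem.List.enumerate longer).map (fun p => (p.2.1, p.1))) (fun t => t.1) false
  let Lu := pvBdedupMin L
  let S := PySem.List.sorted ((PySem.List.enumerate shorter).map (fun p => (p.2.1, p.1))) (fun t => t.1) false
  let pairs := PySem.List.sorted (pvBmerge S Lu) (fun t => t.1) false
  if inlier_matches_1c.length < inlier_matches_12.length then
    (pairs.map (fun p => PySem.List.pyGetD world_points_12 p.2 0),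
     pairs.map (fun p => PySem.List.pyGetD inlier_matches_1c p.1 (0, 0)))
  else
    (pairs.map (fun p => PySem.List.pyGetD world_points_12 p.1 0),
     pairs.map (fun p => PySem.List.pyGetD inlier_matches_1c p.2 (0, 0)))

-- ===== PRECONDITION & SPEC =====
-- Pre_ excludes exactly the inputs on which A raises IndexError: a used index into
-- world_points_12 (a matched index of inlier_matches_12) that is out of range.
def Pre_getCommonWorldPoints (inlier_matches_12 : List (Int × Int)) (inlier_matches_1c : List (Int × Int)) (world_points_12 : List Int) : Prop :=
  if inlier_matches_1c.length < inlier_matches_12.length then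
    ∀ p ∈ inlier_matches_1c,
      (inlier_matches_12.map Prod.fst).idxOf p.1 < inlier_matches_12.length →
      (inlier_matches_12.map Prod.fst).idxOf p.1 < world_points_12.length
  else
    ∀ i : Nat, i < inlier_matches_12.length →
      (inlier_matches_12.getD i (0, 0)).1 ∈ inlier_matches_1c.map Prod.fst →
      i < world_points_12.length
instance (inlier_matches_12 : List (Int × Int)) (inlier_matches_1c : List (Int × Int)) (world_points_12 : List Int) : Decidable (Pre_getCommonWorldPoints inlier_matches_12 inlier_matches_1c world_points_12) := by unfold Pre_getCommonWorldPoints; infer_instance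
def pvWitness_getCommonWorldPoints : (List (Int × Int)) × (List (Int × Int)) × List Int := ([(1, 2)], [(1, 3)], [10])

def Spec_getCommonWorldPoints (inlier_matches_12 : List (Int × Int)) (inlier_matches_1c : List (Int × Int)) (world_points_12 : List Int) (out : List Int × (List (Int × Int))) : Prop := out = getCommonWorldPoints_alt inlier_matches_12 inlier_matches_1c world_points_12
instance (inlier_matches_12 : List (Int × Int)) (inlier_matches_1c : List (Int × Int)) (world_points_12 : List Int) (out : List Int × (List (Int × Int))) : Decidable (Spec_getCommonWorldPoints inlier_matches_12 inlier_matches_1c world_points_12 out) := by unfold Spec_getCommonWorldPoints; infer_instance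

-- ===== CLAIM (what is proved, stated in full; the proofs are below) =====
def Claim_equal_getCommonWorldPoints : Prop := ∀ (inlier_matches_12 : List (Int × Int)) (inlier_matches_1c : List (Int × Int)) (world_points_12 : List Int), Dom_getCommonWorldPoints inlier_matches_12 inlier_matches_1c world_points_12 → Pre_getCommonWorldPoints inlier_matches_12 inlier_matches_1c world_points_12 → Spec_getCommonWorldPoints inlier_matches_12 inlier_matches_1c world_points_12 (getCommonWorldPoints inlier_matches_12 inlier_matches_1c world_points_12)

-- ===== LEMMAS AND PROOFS =====

-- the pairs A's loop builds: (short index, first matching long index), in shorter order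
def pvTgt (shorter longer : List (Int × Int)) : List (Int × Int) :=
  (PySem.List.enumerate shorter).filterMap (fun p => (pvAfind longer 0 p.2.1).map (fun j => (p.1, j)))

-- first value of the assoc list (value → index)
def pvLook : List (Int × Int) → Int → Option Int
  | [], _ => none
  | q :: rest, v => if q.1 = v then some q.2 else pvLook rest v

-- minimal index recorded for value v in a keyed (value, index) list
def pvMfind (xs : List (Int × Int)) (v : Int) : Option Int :=
  ((xs.filter (fun p => p.1 == v)).map Prod.snd).min?

-- A's outer loop produces exactly the two projections of the target pairs list
theorem pvAscan_eq (l : List (Int × Int)) (s : Int) (L : List (Int × Int)) :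
    pvAscan l s L =
      (((PySem.List.enumerate l s).filterMap (fun p => (pvAfind L 0 p.2.1).map (fun j => (p.1, j)))).map (fun p => p.1),
       ((PySem.List.enumerate l s).filterMap (fun p => (pvAfind L 0 p.2.1).map (fun j => (p.1, j)))).map (fun p => p.2)) := by
  induction l generalizing s with
  | nil => simp [pvAscan, PySem.List.enumerate_nil]
  | cons m rest ih =>
    rw [PySem.List.enumerate_cons]
    cases h : pvAfind L 0 m.1 <;>
      simp [pvAscan, h, ih]

theorem min?_perm {l1 l2 : List Int} (h : l1.Perm l2) : l1.min? = l2.min? := by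
  cases h1 : l1.min? with
  | none => rw [List.min?_eq_none_iff] at h1; subst h1; simp [h.symm.eq_nil]
  | some a =>
    rw [List.min?_eq_some_iff] at h1
    symm; rw [List.min?_eq_some_iff]
    exact ⟨h.mem_iff.mp h1.1, fun b hb => h1.2 b (h.mem_iff.mpr hb)⟩

theorem pvMfind_perm {xs ys : List (Int × Int)} (h : xs.Perm ys) (v : Int) :
    pvMfind xs v = pvMfind ys v :=
  min?_perm ((h.filter _).map _)

theorem pvSnd_ge (rest : List (Int × Int)) (t : Int) (v b : Int)
    (hb : b ∈ List.map Prod.snd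
      (List.filter (fun p => p.1 == v) (List.map (fun p => (p.2.1, p.1)) (PySem.List.enumerate rest t)))) :
    t ≤ b := by
  simp only [List.mem_map, List.mem_filter, PySem.List.mem_enumerate_iff] at hb
  obtain ⟨q, ⟨⟨e, ⟨k, hk, rfl⟩, rfl⟩, -⟩, rfl⟩ := hb
  omega

theorem pvMfind_keyed (l : List (Int × Int)) (s : Int) (v : Int) :
    pvMfind ((PySem.List.enumerate l s).map (fun p => (p.2.1, p.1))) v = pvAfind l s v := by
  induction l generalizing s with
  | nil => simp [pvMfind, pvAfind, PySem.List.enumerate_nil]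
  | cons m rest ih =>
    rw [PySem.List.enumerate_cons]
    simp only [pvMfind, List.map_cons, List.filter_cons]
    by_cases hm : m.1 = v
    · simp only [pvAfind, hm, beq_self_eq_true, if_pos, List.map_cons]
      rw [List.min?_eq_some_iff]
      refine ⟨List.mem_cons_self, ?_⟩
      intro b hb
      rcases List.mem_cons.mp hb with rfl | hb
      · exact le_refl b
      · exact le_trans (by omega) (pvSnd_ge rest (s+1) v b hb)
    · have : ((m.1 : Int) == v) = false := by simp [hm]
      simp only [this, if_neg, Bool.false_eq_true, not_false_iff]
      rw [← pvMfind]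
      simp [pvAfind, hm, ih]

theorem pvMin?_cons_cons (a b : Int) (t : List Int) : (a :: b :: t).min? = ((min a b) :: t).min? := by
  simp only [List.min?_cons]
  cases h : t.min? with
  | none => simp
  | some c => simp [min_assoc]

theorem pvLook_dedupMin (xs : List (Int × Int)) (h : xs.Pairwise (fun a b => a.1 ≤ b.1)) (v : Int) :
    pvLook (pvBdedupMin xs) v = pvMfind xs v := by
  fun_induction pvBdedupMin xs with
  | case1 => simp [pvLook, pvMfind]
  | case2 p =>
    by_cases hp : p.1 = v <;>
      simp [pvLook, pvMfind, hp]
  | case3 p q rest heq ih =>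
    have h' : ((p.1, min p.2 q.2) :: rest).Pairwise (fun a b => a.1 ≤ b.1) := by
      simp only [List.pairwise_cons] at h ⊢
      exact ⟨fun x hx => h.1 x (by simp [hx]), h.2.2⟩
    rw [ih h']
    simp only [pvMfind, List.filter_cons, ← heq]
    by_cases hp : p.1 = v
    · simp only [hp, beq_self_eq_true, if_pos, List.map_cons]
      exact (pvMin?_cons_cons p.2 q.2 _).symm
    · have : ((p.1 : Int) == v) = false := by simp [hp]
      simp [this]
  | case4 p q rest hne ih =>
    have hq : (q :: rest).Pairwise (fun a b => a.1 ≤ b.1) := h.sublist (List.sublist_cons_self _ _)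
    have hlt : ∀ x ∈ q :: rest, p.1 < x.1 := by
      intro x hx
      have h1 : p.1 ≤ q.1 := (List.pairwise_cons.mp h).1 q (by simp)
      have h2 : q.1 ≤ x.1 := by
        rcases List.mem_cons.mp hx with rfl | hx'
        · exact le_refl _
        · exact (List.pairwise_cons.mp hq).1 x hx'
      omega
    simp only [pvLook]
    by_cases hp : p.1 = v
    · have hnil : (q :: rest).filter (fun p => p.1 == v) = [] := by
        rw [List.filter_eq_nil_iff]
        intro x hx
        have := hlt x hx
        simp only [ne_eq, beq_iff_eq]
        omega
      simp [hp, pvMfind, hnil]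
    · have : ((p.1 : Int) == v) = false := by simp [hp]
      simp only [if_neg hp, ih hq, pvMfind, List.filter_cons, this]
      simp

theorem pvBdedupMin_subkeys (xs : List (Int × Int)) :
    ∀ r ∈ pvBdedupMin xs, ∃ x ∈ xs, x.1 = r.1 := by
  fun_induction pvBdedupMin xs with
  | case1 => simp
  | case2 p => simp
  | case3 p q rest heq ih =>
    intro r hr
    obtain ⟨x, hx, hxr⟩ := ih r hr
    rcases List.mem_cons.mp hx with rfl | hx'
    · exact ⟨p, by simp, hxr⟩
    · exact ⟨x, by simp [hx'], hxr⟩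
  | case4 p q rest hne ih =>
    intro r hr
    rcases List.mem_cons.mp hr with rfl | hr'
    · exact ⟨r, by simp, rfl⟩
    · obtain ⟨x, hx, hxr⟩ := ih r hr'
      exact ⟨x, by simp [List.mem_cons.mp hx], hxr⟩

theorem pvBdedupMin_pairwise (xs : List (Int × Int)) (h : xs.Pairwise (fun a b => a.1 ≤ b.1)) :
    (pvBdedupMin xs).Pairwise (fun a b => a.1 < b.1) := by
  fun_induction pvBdedupMin xs with
  | case1 => simp
  | case2 p => simp
  | case3 p q rest heq ih =>
    apply ih
    simp only [List.pairwise_cons] at h ⊢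
    exact ⟨fun x hx => h.1 x (by simp [hx]), h.2.2⟩
  | case4 p q rest hne ih =>
    have hq : (q :: rest).Pairwise (fun a b => a.1 ≤ b.1) := h.sublist (List.sublist_cons_self _ _)
    rw [List.pairwise_cons]
    refine ⟨?_, ih hq⟩
    intro r hr
    obtain ⟨x, hx, hxr⟩ := pvBdedupMin_subkeys _ r hr
    have h1 : p.1 ≤ q.1 := (List.pairwise_cons.mp h).1 q (by simp)
    have h2 : q.1 ≤ x.1 := by
      rcases List.mem_cons.mp hx with rfl | hx'
      · exact le_refl _
      · exact (List.pairwise_cons.mp hq).1 x hx'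
    omega

theorem pvLook_none (L : List (Int × Int)) (v : Int) (h : ∀ x ∈ L, x.1 ≠ v) :
    pvLook L v = none := by
  induction L with
  | nil => rfl
  | cons q rest ih =>
    simp only [pvLook, if_neg (h q (by simp))]
    exact ih (fun x hx => h x (by simp [hx]))

theorem pvBmerge_eq (S L : List (Int × Int)) (hS : S.Pairwise (fun a b => a.1 ≤ b.1))
    (hL : L.Pairwise (fun a b => a.1 < b.1)) :
    pvBmerge S L = S.filterMap (fun p => (pvLook L p.1).map (fun j => (p.2, j))) := by
  fun_induction pvBmerge S L with
  | case1 L => simp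
  | case2 p S => simp [pvLook_none]
  | case3 p S q L hpq ih =>
    rw [List.filterMap_cons]
    have hnone : pvLook (q :: L) p.1 = none := by
      apply pvLook_none
      intro x hx
      rcases List.mem_cons.mp hx with rfl | hx'
      · omega
      · have := (List.pairwise_cons.mp hL).1 x hx'; omega
    rw [hnone]
    simp only [Option.map_none]
    exact ih (hS.sublist (List.sublist_cons_self _ _)) hL
  | case4 p S q L hpq hqp ih =>
    rw [ih hS (hL.sublist (List.sublist_cons_self _ _))]
    apply List.filterMap_congr
    intro x hx
    have hxge : p.1 ≤ x.1 := by
      rcases List.mem_cons.mp hx with rfl | hx'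
      · exact le_refl _
      · exact (List.pairwise_cons.mp hS).1 x hx'
    simp only [pvLook, if_neg (by omega : ¬ q.1 = x.1)]
  | case5 p S q L hpq hqp ih =>
    have heq : q.1 = p.1 := by omega
    rw [List.filterMap_cons, ih (hS.sublist (List.sublist_cons_self _ _)) hL]
    simp [pvLook, heq]

theorem pvTgt_pairwise (shorter longer : List (Int × Int)) :
    (pvTgt shorter longer).Pairwise (fun a b => a.1 < b.1) := by
  apply List.Pairwise.filterMap _ _ (PySem.List.pairwise_lt_enumerate shorter 0)
  intro a a' hlt b hb b' hb'
  cases ha : pvAfind longer 0 a.2.1 <;> rw [ha] at hb <;> simp at hb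
  cases ha' : pvAfind longer 0 a'.2.1 <;> rw [ha'] at hb' <;> simp at hb'
  subst hb hb'
  exact hlt

theorem pvB_pairs_eq (shorter longer : List (Int × Int)) :
    PySem.List.sorted
      (pvBmerge
        (PySem.List.sorted ((PySem.List.enumerate shorter).map (fun p => (p.2.1, p.1))) (fun t => t.1) false)
        (pvBdedupMin (PySem.List.sorted ((PySem.List.enumerate longer).map (fun p => (p.2.1, p.1))) (fun t => t.1) false)))
      (fun t => t.1) false = pvTgt shorter longer := by
  set Ks := (PySem.List.enumerate shorter).map (fun p => (p.2.1, p.1)) with hKs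
  set Kl := (PySem.List.enumerate longer).map (fun p => (p.2.1, p.1)) with hKl
  set S := PySem.List.sorted Ks (fun t => t.1) false with hSdef
  set L := PySem.List.sorted Kl (fun t => t.1) false with hLdef
  have hS : S.Pairwise (fun a b => a.1 ≤ b.1) := PySem.List.sorted_pairwise Ks (fun t => t.1)
  have hLp : L.Pairwise (fun a b => a.1 ≤ b.1) := PySem.List.sorted_pairwise Kl (fun t => t.1)
  have hmerge : pvBmerge S (pvBdedupMin L) =
      S.filterMap (fun p => (pvAfind longer 0 p.1).map (fun j => (p.2, j))) := by
    rw [pvBmerge_eq S _ hS (pvBdedupMin_pairwise L hLp)]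
    apply List.filterMap_congr
    intro x _
    rw [pvLook_dedupMin L hLp, pvMfind_perm (PySem.List.sorted_perm Kl (fun t => t.1) false),
        pvMfind_keyed]
  have hperm : (pvTgt shorter longer).Perm (pvBmerge S (pvBdedupMin L)) := by
    rw [hmerge]
    have h1 : Ks.Perm S := (PySem.List.sorted_perm Ks (fun t => t.1) false).symm
    have := h1.filterMap (fun p => (pvAfind longer 0 p.1).map (fun j => (p.2, j)))
    refine List.Perm.trans ?_ this
    rw [hKs, List.filterMap_map]
    rfl
  exact PySem.List.sorted_eq_of_perm_of_pairwise_lt _ _ _ hperm (pvTgt_pairwise shorter longer)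

-- ===== VERDICT (by name: the statement is the Claim_ definition above) =====
theorem getCommonWorldPoints_spec : Claim_equal_getCommonWorldPoints := by
  intro m12 m1c wp _ _
  unfold Spec_getCommonWorldPoints getCommonWorldPoints getCommonWorldPoints_alt
  simp only [pvB_pairs_eq, pvAscan_eq]
  by_cases h : m1c.length < m12.length <;>
    simp [h, pvTgt, List.map_map, Function.comp]
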